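-- pv_equiv track=rewrite | github.com/knutj42/square_8x8_puzzle | puzzle.py | piece_to_grid
-- ===== SOURCE A (Python) =====
-- def piece_to_grid(piece):
--     row = 0
--     grid = [[]]
--     for character in piece:
--         if character == "\n":
--             row += 1
--             grid.append([])
--             continue
--         else:
--             grid[row].append(character)
--
--     if grid[len(grid)-1] == []:
--         # last row is empty, so remove it.
--         grid = grid[:-1]
--
--     max_cols = 0
--     for row in grid:
--         max_cols = max(max_cols, len(row))
--     row_count = len(grid)
--     square_grid_size = max(max_cols, row_count)
--     # pad grid if needed
--     while len(grid) < square_grid_size: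
--         grid.append([])
--
--     for row in grid:
--         while len(row) < square_grid_size:
--             row.append(" ")
--     return grid
-- ===== SOURCE B (Python) =====
-- def piece_to_grid(piece):
--     lines = piece.split('\n')
--     if lines and lines[-1] == '':
--         lines = lines[:-1]
--     size = max(len(lines), max((len(line) for line in lines), default=0))
--     grid = [list(line.ljust(size)) for line in lines]
--     grid.extend([' '] * size for _ in range(size - len(grid)))
--     return grid
-- ===== Notes on version B (the rewrite author's own statement) =====
-- stated objective: idiomatic
-- what changed: Replaces A's row-cursor character loop and per-cell while-append padding with a newline split, a single trailing-empty-line trim, an upfront square-size computation, ljust column padding and a bulk row extend.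
import Mathlib
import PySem

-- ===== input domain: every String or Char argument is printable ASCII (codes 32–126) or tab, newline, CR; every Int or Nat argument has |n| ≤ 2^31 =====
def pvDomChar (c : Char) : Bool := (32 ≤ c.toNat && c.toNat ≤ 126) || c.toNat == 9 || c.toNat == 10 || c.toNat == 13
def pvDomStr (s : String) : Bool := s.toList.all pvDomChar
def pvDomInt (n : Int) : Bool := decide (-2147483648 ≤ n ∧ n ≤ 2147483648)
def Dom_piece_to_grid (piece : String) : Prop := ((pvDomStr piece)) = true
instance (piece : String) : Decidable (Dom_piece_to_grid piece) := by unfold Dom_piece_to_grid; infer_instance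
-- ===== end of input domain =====

-- B computes the square size upfront (split + ljust + extend) instead of A's
-- row-cursor character loop with per-character/per-cell append loops; objective: idiomatic.

-- ===== PORT A =====
-- the character loop: 'row' is the current row index, a '\n' starts a new row,
-- any other character is appended to grid[row] (grid.modify row = in-place mutation of grid[row])
def pieceLoopA : List Char → Nat → List (List String) → List (List String)
  | [], _, grid => grid
  | c :: rest, row, grid =>
    if c = '\n' then pieceLoopA rest (row + 1) (grid ++ [[]])
    else pieceLoopA rest row (grid.modify row (· ++ [String.ofList [c]]))

-- 'while len(grid) < square_grid_size: grid.append([])'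
def growA (size : Nat) (grid : List (List String)) : List (List String) :=
  if grid.length < size then growA size (grid ++ [([] : List String)]) else grid
  termination_by size - grid.length
  decreasing_by simp [List.length_append]; omega

-- 'while len(row) < square_grid_size: row.append(" ")'
def padRowA (size : Nat) (row : List String) : List String :=
  if row.length < size then padRowA size (row ++ [" "]) else row
  termination_by size - row.length
  decreasing_by simp [List.length_append]; omega

def piece_to_grid (piece : String) : List (List String) :=
  let grid := pieceLoopA piece.toList 0 [[]]
  -- 'if grid[len(grid)-1] == []: grid = grid[:-1]'
  let grid := if grid[grid.length - 1]? = some ([] : List String) then grid.dropLast else grid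
  let maxCols := grid.foldl (fun m row => max m row.length) 0
  let rowCount := grid.length
  let squareGridSize := max maxCols rowCount
  let grid := growA squareGridSize grid
  (grid.map (padRowA squareGridSize))

-- ===== PORT B =====
-- Source B: lines = piece.split('\n') → List.splitOnP on the characters;
-- drop one trailing empty line; size upfront; line.ljust(size) = pad with spaces; extend with full space rows
def piece_to_grid_alt (piece : String) : List (List String) :=
  let lines := piece.toList.splitOnP (· == '\n')
  let lines := if lines ≠ [] ∧ lines.getLast? = some ([] : List Char) then lines.dropLast else lines
  let size := max lines.length ((lines.map List.length).foldl max 0)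
  let grid := lines.map (fun line =>
    line.map (fun c => String.ofList [c]) ++ List.replicate (size - line.length) " ")
  grid ++ List.replicate (size - grid.length) (List.replicate size " ")

-- ===== PRECONDITION & SPEC =====
def Spec_piece_to_grid (piece : String) (out : List (List String)) : Prop := out = piece_to_grid_alt piece
instance (piece : String) (out : List (List String)) : Decidable (Spec_piece_to_grid piece out) := by unfold Spec_piece_to_grid; infer_instance

-- ===== CLAIM (what is proved, stated in full; the proofs are below) =====
def Claim_equal_piece_to_grid : Prop := ∀ (piece : String), Dom_piece_to_grid piece → Spec_piece_to_grid piece (piece_to_grid piece)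

-- ===== LEMMAS AND PROOFS =====

def pvCh (c : Char) : String := String.ofList [c]

theorem pv_modify_append {α : Type} (pre : List α) (cur : α) (f : α → α) :
    (pre ++ [cur]).modify pre.length f = pre ++ [f cur] := by
  induction pre with
  | nil => simp [List.modify]
  | cons a t ih => simpa [List.modify] using ih

theorem pv_modifyHead_idfun {a : Type} (l : List a) : List.modifyHead (fun x => x) l = l := by
  cases l <;> simp

theorem pv_loopA_eq (cs : List Char) : ∀ (pre : List (List String)) (cur : List String),
    pieceLoopA cs pre.length (pre ++ [cur]) =
      pre ++ ((cs.splitOnP (· == '\n')).map (List.map pvCh)).modifyHead (cur ++ ·) := by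
  induction cs with
  | nil => intro pre cur; simp [pieceLoopA]
  | cons c rest ih =>
    intro pre cur
    by_cases hc : c = '\n'
    · subst hc
      have h2 : pre.length + 1 = (pre ++ [cur]).length := by simp
      simp only [pieceLoopA, h2, ih]
      
      simp [List.splitOnP_cons, pv_modifyHead_idfun]
    · obtain ⟨r, rs, hr⟩ := List.exists_cons_of_ne_nil (List.splitOnP_ne_nil (· == '\n') rest)
      have hmod := pv_modify_append pre cur (· ++ [String.ofList [c]])
      simp only [pieceLoopA, if_neg hc, hmod, ih pre (cur ++ [String.ofList [c]])]
      simp [List.splitOnP_cons, hc, hr, pvCh]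

theorem pv_growA_eq (size : Nat) : ∀ (k : Nat) (g : List (List String)), size - g.length = k →
    growA size g = g ++ List.replicate k ([] : List String) := by
  intro k
  induction k with
  | zero => intro g h; rw [growA]; simp [Nat.not_lt.mpr (by omega : size ≤ g.length)]
  | succ n ih =>
    intro g h
    rw [growA, if_pos (by omega)]
    rw [ih (g ++ [[]]) (by simp; omega)]
    simp [List.replicate_succ]

theorem pv_padRowA_eq (size : Nat) : ∀ (k : Nat) (r : List String), size - r.length = k →
    padRowA size r = r ++ List.replicate k " " := by
  intro k
  induction k with
  | zero => intro r h; rw [padRowA]; simp [Nat.not_lt.mpr (by omega : size ≤ r.length)]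
  | succ n ih =>
    intro r h
    rw [padRowA, if_pos (by omega)]
    rw [ih (r ++ [" "]) (by simp; omega)]
    simp [List.replicate_succ]

-- ===== VERDICT (by name: the statement is the Claim_ definition above) =====
theorem piece_to_grid_spec : Claim_equal_piece_to_grid := by
  intro piece _
  unfold Spec_piece_to_grid
  simp only [piece_to_grid, piece_to_grid_alt]
  -- the character loop is splitOnP
  have hloop : pieceLoopA piece.toList 0 [[]] =
      (piece.toList.splitOnP (· == '\n')).map (List.map pvCh) := by
    have h := pv_loopA_eq piece.toList [] []
    simpa [pv_modifyHead_idfun] using h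
  rw [hloop]
  set L := piece.toList.splitOnP (· == '\n') with hL
  have hLne : L ≠ [] := List.splitOnP_ne_nil _ _
  -- the trim steps agree
  have hidx : (L.map (List.map pvCh))[(L.map (List.map pvCh)).length - 1]? =
      (L.map (List.map pvCh)).getLast? := List.getLast?_eq_getElem?.symm
  have htrim : (if (L.map (List.map pvCh))[(L.map (List.map pvCh)).length - 1]? = some ([] : List String)
        then (L.map (List.map pvCh)).dropLast else L.map (List.map pvCh)) =
      (if L ≠ [] ∧ L.getLast? = some ([] : List Char) then L.dropLast else L).map (List.map pvCh) := by
    rw [hidx, List.getLast?_map]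
    obtain ⟨x, hx⟩ := Option.isSome_iff_exists.mp (List.getLast?_isSome.mpr hLne)
    rw [hx]
    by_cases hxe : x = []
    · subst hxe; simp [hLne, List.map_dropLast]
    · have hne : List.map pvCh x ≠ [] := by simpa using hxe
      simp [hxe, hne, hLne]
  rw [htrim]
  set M := if L ≠ [] ∧ L.getLast? = some ([] : List Char) then L.dropLast else L with hM
  -- max column count agrees
  have hfold : (M.map (List.map pvCh)).foldl (fun m row => max m row.length) 0 =
      (M.map List.length).foldl max 0 := by
    rw [List.foldl_map, List.foldl_map]; simp
  have hlen : (M.map (List.map pvCh)).length = M.length := by simp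
  rw [hfold, hlen, Nat.max_comm]
  set size := max M.length ((M.map List.length).foldl max 0) with hsize
  -- padding
  rw [pv_growA_eq size (size - M.length) (M.map (List.map pvCh)) (by simp)]
  rw [List.map_append]
  congr 1
  · rw [List.map_map]
    apply List.map_congr_left
    intro l _
    rw [Function.comp_apply, pv_padRowA_eq size (size - (List.map pvCh l).length) _ rfl]
    simp [pvCh]
  · rw [List.map_replicate]
    congr 2
    · simp
    · rw [pv_padRowA_eq size size _ (by simp)]
      simp
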